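-- pv_equiv track=rewrite | github.com/TrellixVulnTeam/eyepeatv_8LHW | zips/plugin.video.vistatvshowbox/resources/lib/modules/source_utils.py | check_direct_url
-- ===== SOURCE A (Python) =====
-- def check_direct_url(url):
--     try:
--         if '4k' in url: quality = '4K'
--         elif '2160p' in url: quality = '4K'
--         elif '2160' in url: quality = '4K'
--         elif '1080p' in url: quality = '1080p'
--         elif '1080' in url: quality = '1080p'
--         elif '720p' in url: quality = '720p'
--         elif '720' in url: quality = '720p'
--         elif any(i in ['dvdscr', 'r5', 'r6'] for i in url): quality = 'SCR'
--         elif any(i in ['camrip', 'tsrip', 'hdcam', 'hdts', 'dvdcam', 'dvdts', 'cam', 'telesync', 'ts'] for i in url): quality = 'CAM'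
--         else: quality = 'SD'
--         return quality
--     except:
--         return 'SD'
-- ===== SOURCE B (Python) =====
-- QUALITY_TABLE = [('4k', '4K'), ('2160', '4K'), ('1080', '1080p'), ('720', '720p')]
--
-- def check_direct_url(url):
--     for sub, label in QUALITY_TABLE:
--         if sub in url:
--             return label
--     return 'SD'
-- ===== Notes on version B (the rewrite author's own statement) =====
-- stated objective: simpler
-- what changed: Replaces the nine-branch elif ladder with a first-match scan over a four-entry (substring,label) table; redundant longer patterns collapse into their prefix entries, and the two any()-over-characters clauses are dropped because a single character can never equal a multi-character string, so they can never fire on a string input.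
import Mathlib
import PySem

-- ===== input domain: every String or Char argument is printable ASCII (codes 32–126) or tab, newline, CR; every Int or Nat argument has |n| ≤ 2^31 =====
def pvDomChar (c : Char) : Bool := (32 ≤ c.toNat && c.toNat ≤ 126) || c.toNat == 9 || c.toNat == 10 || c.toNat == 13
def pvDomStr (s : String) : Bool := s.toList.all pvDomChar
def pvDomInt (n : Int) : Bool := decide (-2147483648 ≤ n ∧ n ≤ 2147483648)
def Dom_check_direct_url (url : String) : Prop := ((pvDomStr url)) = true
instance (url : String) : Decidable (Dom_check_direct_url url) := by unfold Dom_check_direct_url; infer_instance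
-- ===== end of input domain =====

-- B replaces A's nine-branch elif ladder by a first-match scan over a four-entry table (objective: simpler).

-- ===== PORT A =====
def check_direct_url (url : String) : String :=
  if PySem.Str.isIn "4k" url then "4K"
  else if PySem.Str.isIn "2160p" url then "4K"
  else if PySem.Str.isIn "2160" url then "4K"
  else if PySem.Str.isIn "1080p" url then "1080p"
  else if PySem.Str.isIn "1080" url then "1080p"
  else if PySem.Str.isIn "720p" url then "720p"
  else if PySem.Str.isIn "720" url then "720p"
  else if url.toList.any (fun i => ["dvdscr", "r5", "r6"].contains (String.singleton i)) then "SCR"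
  else if url.toList.any (fun i => ["camrip", "tsrip", "hdcam", "hdts", "dvdcam", "dvdts", "cam", "telesync", "ts"].contains (String.singleton i)) then "CAM"
  else "SD"

-- ===== PORT B =====
def qualityTable : List (String × String) :=
  [("4k", "4K"), ("2160", "4K"), ("1080", "1080p"), ("720", "720p")]

def firstLabel : List (String × String) → String → String
  | [], _ => "SD"
  | (sub, lab) :: rest, url => if PySem.Str.isIn sub url then lab else firstLabel rest url

def check_direct_url_alt (url : String) : String := firstLabel qualityTable url

-- ===== PRECONDITION & SPEC =====
def Spec_check_direct_url (url : String) (out : String) : Prop := out = check_direct_url_alt url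
instance (url : String) (out : String) : Decidable (Spec_check_direct_url url out) := by unfold Spec_check_direct_url; infer_instance

-- ===== CLAIM (what is proved, stated in full; the proofs are below) =====
def Claim_equal_check_direct_url : Prop := ∀ (url : String), Dom_check_direct_url url → Spec_check_direct_url url (check_direct_url url)

-- ===== LEMMAS AND PROOFS =====

-- A single character can never equal one of A's multi-character SCR markers.
theorem scr_char_ne (c : Char) :
    ¬(String.singleton c = "dvdscr" ∨ String.singleton c = "r5" ∨ String.singleton c = "r6") := by
  rintro (h | h | h) <;>
    · have := congrArg (fun s => s.toList.length) h
      simp [String.singleton] at this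

-- A single character can never equal one of A's multi-character CAM markers.
theorem cam_char_ne (c : Char) :
    ¬(String.singleton c = "camrip" ∨ String.singleton c = "tsrip" ∨ String.singleton c = "hdcam" ∨
      String.singleton c = "hdts" ∨ String.singleton c = "dvdcam" ∨ String.singleton c = "dvdts" ∨
      String.singleton c = "cam" ∨ String.singleton c = "telesync" ∨ String.singleton c = "ts") := by
  rintro (h | h | h | h | h | h | h | h | h) <;>
    · have := congrArg (fun s => s.toList.length) h
      simp [String.singleton] at this

theorem chars_isIn_of_isIn_longer (sub mid : List Char) (url : String)
    (hsub : sub <:+: mid)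
    (h : PySem.Chars.isIn mid url.toList = true) :
    PySem.Chars.isIn sub url.toList = true := by
  rw [PySem.Chars.isIn_iff_infix] at h ⊢
  exact hsub.trans h

-- ===== VERDICT (by name: the statement is the Claim_ definition above) =====
theorem check_direct_url_spec : Claim_equal_check_direct_url := by
  intro url _
  unfold Spec_check_direct_url check_direct_url check_direct_url_alt qualityTable
  simp only [firstLabel]
  by_cases h4 : PySem.Chars.isIn ['4', 'k'] url.toList = true
  · simp [h4]
  · by_cases h2p : PySem.Chars.isIn ['2', '1', '6', '0', 'p'] url.toList = true
    · have h2 : PySem.Chars.isIn ['2', '1', '6', '0'] url.toList = true :=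
        chars_isIn_of_isIn_longer _ _ url (by decide) h2p
      simp [h4, h2p, h2]
    · by_cases h2 : PySem.Chars.isIn ['2', '1', '6', '0'] url.toList = true
      · simp [h4, h2p, h2]
      · by_cases h1p : PySem.Chars.isIn ['1', '0', '8', '0', 'p'] url.toList = true
        · have h1 : PySem.Chars.isIn ['1', '0', '8', '0'] url.toList = true :=
            chars_isIn_of_isIn_longer _ _ url (by decide) h1p
          simp [h4, h2p, h2, h1p, h1]
        · by_cases h1 : PySem.Chars.isIn ['1', '0', '8', '0'] url.toList = true
          · simp [h4, h2p, h2, h1p, h1]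
          · by_cases h7p : PySem.Chars.isIn ['7', '2', '0', 'p'] url.toList = true
            · have h7 : PySem.Chars.isIn ['7', '2', '0'] url.toList = true :=
                chars_isIn_of_isIn_longer _ _ url (by decide) h7p
              simp [h4, h2p, h2, h1p, h1, h7p, h7]
            · by_cases h7 : PySem.Chars.isIn ['7', '2', '0'] url.toList = true
              · simp [h4, h2p, h2, h1p, h1, h7p, h7]
              · have hscr : ¬ ∃ x ∈ url.toList,
                    String.singleton x = "dvdscr" ∨ String.singleton x = "r5" ∨
                    String.singleton x = "r6" := by
                  rintro ⟨c, -, h⟩; exact scr_char_ne c h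
                have hcam : ¬ ∃ x ∈ url.toList,
                    String.singleton x = "camrip" ∨ String.singleton x = "tsrip" ∨
                    String.singleton x = "hdcam" ∨ String.singleton x = "hdts" ∨
                    String.singleton x = "dvdcam" ∨ String.singleton x = "dvdts" ∨
                    String.singleton x = "cam" ∨ String.singleton x = "telesync" ∨
                    String.singleton x = "ts" := by
                  rintro ⟨c, -, h⟩; exact cam_char_ne c h
                simp [h4, h2p, h2, h1p, h1, h7p, h7, hscr, hcam]
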